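-- pv_equiv track=rewrite | github.com/zeotq/mai-py-labs | 2.4/task_18.py | firTable
-- ===== SOURCE A (Python) =====
-- def firTable(rang: int = 1) -> list:
--     """Создание новогодней математической ёлки.
--
--     Args:
--         rang (int, optional): Последнее число ёлки. Defaults to 1.
--
--     Returns:
--         list: Матрица ёлка.
--     """
--
--     table = []
--     n, k = 1, 1
--     while n <= rang:
--         table.append(list(range(n, (n + k if n + k <= rang else rang + 1))))
--         n += k
--         k += 1
--     return table
-- ===== SOURCE B (Python) =====
-- def firTable(rang: int = 1) -> list:
--     table = []
--     cur = []
--     k = 1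
--     for v in range(1, rang + 1):
--         cur.append(v)
--         if len(cur) == k:
--             table.append(cur)
--             cur = []
--             k += 1
--     if cur:
--         table.append(cur)
--     return table
-- ===== Notes on version B (the rewrite author's own statement) =====
-- stated objective: alternative
-- what changed: Replaces A's per-row while loop that slices range(n, n+k) row-by-row with a single element-by-element pass over 1..rang that accumulates a current row and flushes it (and bumps the target length) whenever it reaches length k, flushing the trailing partial row at the end.
import Mathlib
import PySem

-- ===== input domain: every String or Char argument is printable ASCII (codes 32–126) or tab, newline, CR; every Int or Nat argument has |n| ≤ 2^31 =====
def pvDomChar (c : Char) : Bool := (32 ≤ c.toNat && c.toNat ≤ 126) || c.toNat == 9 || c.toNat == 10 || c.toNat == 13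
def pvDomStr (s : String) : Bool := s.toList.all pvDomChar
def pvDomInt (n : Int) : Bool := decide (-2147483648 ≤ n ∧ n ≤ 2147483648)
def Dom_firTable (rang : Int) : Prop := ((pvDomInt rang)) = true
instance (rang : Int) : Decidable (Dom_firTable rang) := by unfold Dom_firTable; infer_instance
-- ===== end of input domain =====

-- B builds the same increasing-length rows in one element-by-element pass with a flush,
-- instead of A's per-row while loop slicing ranges (objective: alternative decomposition).

-- ===== PORT A =====
-- A's while loop: n increases by k ≥ 1 each iteration, so rang.toNat fuel suffices.
def firTableLoop : Nat → Int → Int → Int → List (List Int)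
  | 0, _, _, _ => []
  | fuel + 1, rang, n, k =>
    if n ≤ rang then
      PySem.List.pyRange n (if n + k ≤ rang then n + k else rang + 1) 1
        :: firTableLoop fuel rang (n + k) (k + 1)
    else []

def firTable (rang : Int) : List (List Int) := firTableLoop rang.toNat rang 1 1

-- ===== PORT B =====
-- one loop step of B: append v to the current row, flush it when it reaches length k
def altStep (st : List (List Int) × List Int × Int) (v : Int) :
    List (List Int) × List Int × Int :=
  let cur' := st.2.1 ++ [v]
  if (cur'.length : Int) = st.2.2 then (st.1 ++ [cur'], [], st.2.2 + 1)
  else (st.1, cur', st.2.2)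

def firTable_alt (rang : Int) : List (List Int) :=
  let s := (PySem.List.pyRange 1 (rang + 1) 1).foldl altStep ([], [], 1)
  if s.2.1 = [] then s.1 else s.1 ++ [s.2.1]

-- ===== PRECONDITION & SPEC =====
def Spec_firTable (rang : Int) (out : List (List Int)) : Prop := out = firTable_alt rang
instance (rang : Int) (out : List (List Int)) : Decidable (Spec_firTable rang out) := by unfold Spec_firTable; infer_instance

-- ===== CLAIM (what is proved, stated in full; the proofs are below) =====
def Claim_equal_firTable : Prop := ∀ (rang : Int), Dom_firTable rang → Spec_firTable rang (firTable rang)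

-- ===== LEMMAS AND PROOFS =====

-- B's fold consumes exactly j = k - |c| values to fill and flush the current row
lemma altStep_fill (j : Nat) : ∀ (n m k : Int) (c : List Int) (table : List (List Int)),
    1 ≤ j → (c.length : Int) + j = k →
    (PySem.List.pyRange n m 1).foldl altStep (table, c, k) =
      if n + j ≤ m then
        (PySem.List.pyRange (n + j) m 1).foldl altStep
          (table ++ [c ++ PySem.List.pyRange n (n + j) 1], [], k + 1)
      else (table, c ++ PySem.List.pyRange n m 1, k) := by
  induction j with
  | zero => intro _ _ _ _ _ h; omega
  | succ j ih =>
    intro n m k c table _ hk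
    by_cases hnm : n < m
    · rw [PySem.List.pyRange_one_cons hnm, List.foldl_cons]
      by_cases hj : j = 0
      · subst hj
        have hflush : (c.length : Int) + 1 = k := by omega
        have hstep : altStep (table, c, k) n = (table ++ [c ++ [n]], [], k + 1) := by
          simp [altStep, hflush]
        rw [hstep, show n + (((0 : Nat) + 1 : Nat) : Int) = n + 1 from by norm_num,
          PySem.List.pyRange_one_singleton, if_pos (by omega : n + 1 ≤ m)]
      · have hno : ¬ ((c.length : Int) + 1 = k) := by omega
        have hstep : altStep (table, c, k) n = (table, c ++ [n], k) := by
          simp [altStep, hno]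
        rw [hstep,
          ih (n + 1) m k (c ++ [n]) table (by omega) (by simp; omega),
          show n + ((j + 1 : Nat) : Int) = n + 1 + (j : Int) from by push_cast; ring]
        have hsplit : c ++ [n] ++ PySem.List.pyRange (n + 1) (n + 1 + (j : Int)) 1
            = c ++ PySem.List.pyRange n (n + 1 + (j : Int)) 1 := by
          rw [List.append_assoc]
          congr 1
          rw [PySem.List.pyRange_one_append n (n + 1) (n + 1 + (j : Int)) (by omega) (by omega),
            PySem.List.pyRange_one_singleton]
        by_cases hle : n + 1 + (j : Int) ≤ m
        · rw [if_pos hle, if_pos hle, hsplit]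
        · rw [if_neg hle, if_neg hle]
          simp
    · rw [PySem.List.pyRange_one_eq_nil (show m ≤ n by omega), List.foldl_nil,
        if_neg (by omega)]
      simp

-- A's loop returns [] whenever the guard fails, with any fuel
lemma firTableLoop_stop (fuel : Nat) (rang n k : Int) (h : rang < n) :
    firTableLoop fuel rang n k = [] := by
  cases fuel with
  | zero => rfl
  | succ fuel => simp [firTableLoop, show ¬ n ≤ rang by omega]

-- main invariant: finalizing B's fold from any row boundary equals A's remaining loop
lemma main_inv (fuel : Nat) : ∀ (rang n k : Int) (table : List (List Int)),
    1 ≤ k → (rang + 1 - n).toNat ≤ fuel →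
    (let s := (PySem.List.pyRange n (rang + 1) 1).foldl altStep (table, [], k)
     if s.2.1 = [] then s.1 else s.1 ++ [s.2.1]) = table ++ firTableLoop fuel rang n k := by
  induction fuel with
  | zero =>
    intro rang n k table _ hf
    have : rang + 1 ≤ n := by omega
    simp [PySem.List.pyRange_one_eq_nil this, firTableLoop]
  | succ fuel ih =>
    intro rang n k table hk hf
    by_cases hn : n ≤ rang
    · have hfill := altStep_fill k.toNat n (rang + 1) k [] table (by omega) (by simp; omega)
      simp only [List.nil_append] at hfill
      rw [show ((k.toNat : Int)) = k from by omega] at hfill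
      by_cases hcase : n + k ≤ rang + 1
      · rw [if_pos hcase] at hfill
        simp only [hfill]
        have hf' : (rang + 1 - (n + k)).toNat ≤ fuel := by omega
        rw [ih rang (n + k) (k + 1) (table ++ [PySem.List.pyRange n (n + k) 1]) (by omega) hf',
          List.append_assoc]
        congr 1
        simp only [firTableLoop, if_pos hn, List.singleton_append]
        congr 2
        by_cases h2 : n + k ≤ rang
        · rw [if_pos h2]
        · rw [if_neg h2, show rang + 1 = n + k from by omega]
      · rw [if_neg hcase] at hfill
        simp only [hfill]
        have hne : PySem.List.pyRange n (rang + 1) 1 ≠ [] := by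
          rw [PySem.List.pyRange_one_cons (by omega)]; simp
        rw [if_neg (by simpa using hne)]
        simp only [firTableLoop, if_pos hn, if_neg (by omega : ¬ n + k ≤ rang)]
        rw [firTableLoop_stop fuel rang (n + k) (k + 1) (by omega)]
    · rw [PySem.List.pyRange_one_eq_nil (by omega)]
      simp [firTableLoop_stop (fuel + 1) rang n k (by omega)]

-- ===== VERDICT (by name: the statement is the Claim_ definition above) =====
theorem firTable_spec : Claim_equal_firTable := by
  intro rang _
  unfold Spec_firTable firTable firTable_alt
  rw [main_inv rang.toNat rang 1 1 [] (by omega) (by omega)]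
  simp
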